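-- pv_equiv track=rewrite | github.com/datoad4510/OMSCS | Mini Project 2 (stacking blocks)/BlockWorldAgent.py | free_top
-- ===== SOURCE A (Python) =====
-- def free_top(arrangement, block):
--     # remove blocks that are on top of the given block
--     moves = []
--     for stack in arrangement:
--         found_stack = False
--         for running_block in stack:
--             if running_block == block:
--                 found_stack = True
--                 break
--
--         if found_stack:
--             while stack[-1] != block:
--                 top_block = stack[-1]
--                 stack.pop()
--
--                 # move the top block off of the stack and onto the table
--                 arrangement.append([top_block])
--                 moves.append((top_block,"Table"))
--
--             break
--
--
--     return moves
-- ===== SOURCE B (Python) =====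
-- def free_top(arrangement, block):
--     # find the first stack containing the block, cut off everything above
--     # its topmost (rightmost) occurrence in one slice, and emit the cut
--     # blocks top-first as moves to the table (mutating like the original).
--     for stack in arrangement:
--         if block in stack:
--             pos = len(stack) - 1 - stack[::-1].index(block)
--             above = stack[pos + 1:]
--             del stack[pos + 1:]
--             moves = [(b, "Table") for b in reversed(above)]
--             arrangement.extend([b] for b, _ in moves)
--             return moves
--     return []
-- ===== Notes on version B (the rewrite author's own statement) =====
-- stated objective: simpler
-- what changed: Replaces A's found-flag scan plus one-pop-at-a-time while loop with membership + reversed-index to locate the topmost occurrence, a single slice cutting off everything above it, and a comprehension emitting the moves top-first.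
import Mathlib
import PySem

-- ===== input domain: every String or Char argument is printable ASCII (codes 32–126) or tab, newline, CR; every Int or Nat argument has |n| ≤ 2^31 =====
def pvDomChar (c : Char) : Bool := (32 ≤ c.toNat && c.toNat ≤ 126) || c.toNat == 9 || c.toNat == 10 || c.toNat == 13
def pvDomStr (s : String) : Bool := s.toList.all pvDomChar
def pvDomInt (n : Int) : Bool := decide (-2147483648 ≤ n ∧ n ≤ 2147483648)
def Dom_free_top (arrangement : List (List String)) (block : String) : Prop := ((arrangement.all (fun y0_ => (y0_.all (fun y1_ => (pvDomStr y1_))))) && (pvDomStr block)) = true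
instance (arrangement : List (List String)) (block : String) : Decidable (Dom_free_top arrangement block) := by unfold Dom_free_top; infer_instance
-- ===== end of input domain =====

-- B replaces A's pop-one-at-a-time while loop by locating the topmost occurrence
-- with a reversed .index and slicing off everything above it in one step (simpler).
-- A mutates `arrangement`/`stack` in place (B performs the same mutation in Python);
-- the equivalence proved here is about the RETURN value only.

-- ===== PORT A =====
-- A's while loop pops from the END of `stack`; on the reversed stack that is
-- recursion on the head: pop (emit a move) while the top block ≠ `block`.
def freeTopPop : List String → String → List (String × String)
  | [], _ => []
  | t :: rest, block => if t = block then [] else (t, "Table") :: freeTopPop rest block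

def free_top (arrangement : List (List String)) (block : String) : List (String × String) :=
  -- for stack in arrangement: inner loop sets found_stack ⟺ block ∈ stack; then while-pop and break
  match arrangement with
  | [] => []
  | stack :: rest =>
    if stack.contains block then freeTopPop stack.reverse block
    else free_top rest block

-- ===== PORT B =====
def free_top_alt (arrangement : List (List String)) (block : String) : List (String × String) :=
  match arrangement.find? (fun s => s.contains block) with
  | none => []                                    -- no stack holds the block: no moves
  | some stack =>
    match PySem.List.index? stack.reverse block with  -- stack[::-1].index(block)
    | none => []                                  -- unreachable: find? guarantees membership
    | some i =>
      let pos := stack.length - 1 - i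
      let above := stack.drop (pos + 1)           -- stack[pos+1:]
      above.reverse.map (fun b => (b, "Table"))   -- top-first moves

-- ===== PRECONDITION & SPEC =====
def Spec_free_top (arrangement : List (List String)) (block : String) (out : List (String × String)) : Prop := out = free_top_alt arrangement block
instance (arrangement : List (List String)) (block : String) (out : List (String × String)) : Decidable (Spec_free_top arrangement block out) := by unfold Spec_free_top; infer_instance

-- ===== CLAIM (what is proved, stated in full; the proofs are below) =====
def Claim_equal_free_top : Prop := ∀ (arrangement : List (List String)) (block : String), Dom_free_top arrangement block → Spec_free_top arrangement block (free_top arrangement block)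

-- ===== LEMMAS AND PROOFS =====

-- A's pop loop on a list equals taking the prefix up to the first occurrence found by .index
theorem freeTopPop_eq_take (block : String) : ∀ (r : List String) (i : Nat),
    PySem.List.index? r block = some i →
    freeTopPop r block = (r.take i).map (fun b => (b, "Table")) := by
  intro r
  induction r with
  | nil => intro i h; simp [PySem.List.index?] at h
  | cons t rest ih =>
    intro i h
    by_cases ht : t = block
    · subst ht
      rw [PySem.List.index?_cons_self] at h
      cases h
      simp [freeTopPop]
    · rw [PySem.List.index?_cons_of_ne rest ht] at h
      cases hr : PySem.List.index? rest block with
      | none => rw [hr] at h; simp at h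
      | some j =>
        rw [hr] at h
        simp at h
        subst h
        simp [freeTopPop, ht, ih j hr]

theorem index?_lt_length {α : Type} [BEq α] [LawfulBEq α] (xs : List α) (v : α) (k : Nat)
    (h : PySem.List.index? xs v = some k) : k < xs.length := by
  rw [PySem.List.index?_eq_some_iff] at h
  obtain ⟨pre, suf, hx, hlen, -⟩ := h
  subst hx
  simp [← hlen]

theorem free_top_eq : ∀ (arrangement : List (List String)) (block : String), free_top arrangement block = free_top_alt arrangement block := by
  intro arrangement block
  induction arrangement with
  | nil => simp [free_top, free_top_alt]
  | cons stack rest ih =>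
    by_cases h : stack.contains block
    · have hmem : block ∈ stack := by simpa using h
      have hmemr : block ∈ stack.reverse := by simpa using hmem
      have hsome : (PySem.List.index? stack.reverse block).isSome = true :=
        (PySem.List.index?_isSome_iff _ _).mpr hmemr
      cases hi : PySem.List.index? stack.reverse block with
      | none => rw [hi] at hsome; simp at hsome
      | some i =>
        have hlt : i < stack.length := by
          have := index?_lt_length _ _ _ hi
          simpa using this
        have hdrop : (stack.drop (stack.length - 1 - i + 1)).reverse
            = stack.reverse.take i := by
          have harith : stack.length - 1 - i + 1 = stack.length - i := by omega
          rw [harith, ← List.take_reverse]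
        have hfind : List.find? (fun s => s.contains block) (stack :: rest) = some stack :=
          List.find?_cons_of_pos h
        have hA : free_top (stack :: rest) block = freeTopPop stack.reverse block := by
          simp [free_top, hmem]
        have hB : free_top_alt (stack :: rest) block
            = ((stack.drop (stack.length - 1 - i + 1)).reverse).map (fun b => (b, "Table")) := by
          simp only [free_top_alt, hfind, hi]
        rw [hA, hB, hdrop]
        exact freeTopPop_eq_take block _ i hi
    · have hfind : List.find? (fun s => s.contains block) (stack :: rest)
          = List.find? (fun s => s.contains block) rest :=
        List.find?_cons_of_neg (by simpa using h)
      have hnot : block ∉ stack := by simpa using h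
      have hA : free_top (stack :: rest) block = free_top rest block := by
        simp [free_top, hnot]
      have hB : free_top_alt (stack :: rest) block = free_top_alt rest block := by
        simp only [free_top_alt, hfind]
      rw [hA, hB, ih]

-- ===== VERDICT (by name: the statement is the Claim_ definition above) =====

theorem free_top_spec : Claim_equal_free_top := fun arrangement block _ => free_top_eq arrangement block
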